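-- pv_equiv track=rewrite | github.com/jwjoel/lab-backup | cse207b/hw6-sol.py | remainder_tree
-- ===== SOURCE A (Python) =====
-- def remainder_tree(P, tree):
--     """
--     Computes the remainders P mod Ni^2 for each Ni efficiently using the remainder tree.
--     """
--     remainders = [P] * len(tree[-1])
--     for level in reversed(range(len(tree))):
--         ns = tree[level]
--         new_remainders = []
--         for i in range(len(ns)):
--             remainder = remainders[i//2] % (ns[i]**2)
--             new_remainders.append(remainder)
--         remainders = new_remainders
--     return remainders
-- ===== SOURCE B (Python) =====
-- def remainder_tree(P, tree):
--     """
--     Computes the remainders P mod Ni^2 for each Ni using a recursive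
--     divide-and-conquer descent over the implicit binary tree.
--     """
--     def descend(level, i, r):
--         r2 = r % (tree[level][i] ** 2)
--         if level == 0:
--             return [r2]
--         out = []
--         for c in (2 * i, 2 * i + 1):
--             if c < len(tree[level - 1]):
--                 out += descend(level - 1, c, r2)
--         return out
--     result = []
--     for j in range(len(tree[-1])):
--         result += descend(len(tree) - 1, j, P)
--     return result
-- ===== Notes on version B (the rewrite author's own statement) =====
-- stated objective: alternative
-- what changed: Replaces A's iterative level-by-level sweep (rebuilding the whole remainder list at every level) by a recursive divide-and-conquer descent over the implicit binary tree that carries each node's remainder down to its at-most-two children and concatenates the leaf chunks.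
import Mathlib
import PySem

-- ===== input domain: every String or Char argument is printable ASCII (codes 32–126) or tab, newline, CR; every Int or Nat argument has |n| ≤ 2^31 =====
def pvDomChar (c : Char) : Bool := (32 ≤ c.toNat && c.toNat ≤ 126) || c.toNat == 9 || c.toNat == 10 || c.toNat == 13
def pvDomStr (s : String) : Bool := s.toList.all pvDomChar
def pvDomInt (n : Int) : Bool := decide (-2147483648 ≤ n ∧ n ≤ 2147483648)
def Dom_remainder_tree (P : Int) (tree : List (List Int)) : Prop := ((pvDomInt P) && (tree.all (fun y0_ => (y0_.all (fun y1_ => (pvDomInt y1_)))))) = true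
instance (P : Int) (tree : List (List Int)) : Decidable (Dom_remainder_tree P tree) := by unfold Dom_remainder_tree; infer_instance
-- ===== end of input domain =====

-- B replaces A's level-by-level sweep by a recursive divide-and-conquer descent over the
-- implicit binary tree (objective: alternative decomposition, same asymptotic cost).

-- ===== PORT A =====
def remainder_tree (P : Int) (tree : List (List Int)) : List Int :=
  let remainders := List.replicate (PySem.List.pyGetD tree (-1) []).length P
  (PySem.List.pyRange ((tree.length : Int) - 1) (-1) (-1)).foldl
    (fun remainders level =>
      let ns := PySem.List.pyGetD tree level []
      (PySem.List.pyRange 0 (ns.length : Int) 1).foldl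
        (fun newRemainders i =>
          newRemainders ++ [PySem.Int.mod
            (PySem.List.pyGetD remainders (PySem.Int.floordiv i 2) 0)
            ((PySem.List.pyGetD ns i 0) ^ 2)])
        [])
    remainders

-- ===== PORT B =====
-- recursive descent over the implicit binary tree (transliteration of Source B's `descend`)
def pvDescend (tree : List (List Int)) : Nat → Nat → Int → List Int
  | 0, i, r => [PySem.Int.mod r ((tree.getD 0 []).getD i 0 ^ 2)]
  | level + 1, i, r =>
    let r2 := PySem.Int.mod r ((tree.getD (level + 1) []).getD i 0 ^ 2)
    (if 2 * i < (tree.getD level []).length then pvDescend tree level (2 * i) r2 else []) ++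
    (if 2 * i + 1 < (tree.getD level []).length then pvDescend tree level (2 * i + 1) r2 else [])

def remainder_tree_alt (P : Int) (tree : List (List Int)) : List Int :=
  (List.range (PySem.List.pyGetD tree (-1) []).length).foldl
    (fun result j => result ++ pvDescend tree (tree.length - 1) j P) []

-- ===== PRECONDITION & SPEC =====
-- Pre_ excludes exactly the inputs where the Python A raises: an empty tree (IndexError on
-- tree[-1]), a level more than twice as long as the level above it (IndexError on
-- remainders[i//2]), and a zero entry (ZeroDivisionError on % 0).
def Pre_remainder_tree (P : Int) (tree : List (List Int)) : Prop :=
  tree ≠ [] ∧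
  (∀ ℓ < tree.length - 1, (tree.getD ℓ []).length ≤ 2 * (tree.getD (ℓ + 1) []).length) ∧
  (∀ ns ∈ tree, ∀ n ∈ ns, n ≠ 0)

instance (P : Int) (tree : List (List Int)) : Decidable (Pre_remainder_tree P tree) := by
  unfold Pre_remainder_tree; infer_instance

def pvWitness_remainder_tree : Int × List (List Int) := (100, [[3, 5], [7]])

def Spec_remainder_tree (P : Int) (tree : List (List Int)) (out : List Int) : Prop := out = remainder_tree_alt P tree
instance (P : Int) (tree : List (List Int)) (out : List Int) : Decidable (Spec_remainder_tree P tree out) := by unfold Spec_remainder_tree; infer_instance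

-- ===== CLAIM (what is proved, stated in full; the proofs are below) =====
def Claim_equal_remainder_tree : Prop := ∀ (P : Int) (tree : List (List Int)), Dom_remainder_tree P tree → Pre_remainder_tree P tree → Spec_remainder_tree P tree (remainder_tree P tree)


-- ===== LEMMAS AND PROOFS =====

-- one level of A's sweep, in Nat-indexed form
def pvStep (ns : List Int) (rems : List Int) : List Int :=
  (List.range ns.length).map
    (fun k => PySem.Int.mod (rems.getD (k / 2) 0) ((ns.getD k 0) ^ 2))

-- A's remainder list at level ℓ (the state of A's loop after processing levels L-1 … ℓ)
def pvR (P : Int) (tree : List (List Int)) (ℓ : Nat) : List Int :=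
  (tree.drop ℓ).foldr pvStep (List.replicate (PySem.List.pyGetD tree (-1) []).length P)

theorem pvR_succ (P : Int) (tree : List (List Int)) (ℓ : Nat) (h : ℓ < tree.length) :
    pvR P tree ℓ = pvStep (tree.getD ℓ []) (pvR P tree (ℓ + 1)) := by
  unfold pvR
  rw [List.drop_eq_getElem_cons h, List.getD_eq_getElem _ _ h]
  rfl

theorem pvStep_length (ns rems : List Int) : (pvStep ns rems).length = ns.length := by
  simp [pvStep]

theorem pvStep_getD (ns rems : List Int) (k : Nat) (h : k < ns.length) :
    (pvStep ns rems).getD k 0 =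
      PySem.Int.mod (rems.getD (k / 2) 0) ((ns.getD k 0) ^ 2) := by
  unfold pvStep
  rw [List.getD_eq_getElem?_getD]
  simp [h]

theorem pvR_length (P : Int) (tree : List (List Int)) (ℓ : Nat) (h : ℓ < tree.length) :
    (pvR P tree ℓ).length = (tree.getD ℓ []).length := by
  rw [pvR_succ P tree ℓ h, pvStep_length]

-- size chain: the leaf level is at most 2^ℓ times level ℓ
theorem pvChain (tree : List (List Int))
    (Hlen : ∀ ℓ < tree.length - 1, (tree.getD ℓ []).length ≤ 2 * (tree.getD (ℓ + 1) []).length) :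
    ∀ ℓ < tree.length, (tree.getD 0 []).length ≤ 2 ^ ℓ * (tree.getD ℓ []).length := by
  intro ℓ
  induction ℓ with
  | zero => intro _; simp
  | succ ℓ ih =>
      intro h
      calc (tree.getD 0 []).length ≤ 2 ^ ℓ * (tree.getD ℓ []).length := ih (by omega)
        _ ≤ 2 ^ ℓ * (2 * (tree.getD (ℓ + 1) []).length) :=
            Nat.mul_le_mul (Nat.le_refl _) (Hlen ℓ (by omega))
        _ = 2 ^ (ℓ + 1) * (tree.getD (ℓ + 1) []).length := by ring

-- the drop/take split of a chunk
theorem pvDropTakeSplit {α : Type} (xs : List α) (a m n : Nat) :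
    (xs.drop a).take (m + n) = (xs.drop a).take m ++ (xs.drop (a + m)).take n := by
  rw [List.take_add, List.drop_drop]

-- main lemma: the descent from node (ℓ, i), fed its parent's remainder, produces exactly the
-- chunk of A's leaf-level answer below that node
theorem pvDescend_eq (P : Int) (tree : List (List Int))
    (Hlen : ∀ ℓ < tree.length - 1, (tree.getD ℓ []).length ≤ 2 * (tree.getD (ℓ + 1) []).length) :
    ∀ ℓ, ℓ < tree.length → ∀ i, i < (tree.getD ℓ []).length →
      pvDescend tree ℓ i ((pvR P tree (ℓ + 1)).getD (i / 2) 0) =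
        ((pvR P tree 0).drop (i * 2 ^ ℓ)).take (2 ^ ℓ) := by
  intro ℓ
  induction ℓ with
  | zero =>
      intro h0 i hi
      have hii : i < (pvR P tree 0).length := by rw [pvR_length P tree 0 h0]; exact hi
      have hrhs : ((pvR P tree 0).drop (i * 2 ^ 0)).take (2 ^ 0) = [(pvR P tree 0).getD i 0] := by
        rw [pow_zero, Nat.mul_one, List.drop_eq_getElem_cons hii, List.getD_eq_getElem _ _ hii]
        rfl
      rw [hrhs, pvR_succ P tree 0 h0, pvStep_getD _ _ _ hi]
      rfl
  | succ ℓ ih =>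
      intro h i hi
      have hl : ℓ < tree.length := by omega
      have hr2 : PySem.Int.mod ((pvR P tree (ℓ + 1 + 1)).getD (i / 2) 0)
          ((tree.getD (ℓ + 1) []).getD i 0 ^ 2) = (pvR P tree (ℓ + 1)).getD i 0 := by
        rw [pvR_succ P tree (ℓ + 1) h, pvStep_getD _ _ _ hi]
      have hchain := pvChain tree Hlen ℓ hl
      have hlen0 := pvR_length P tree 0 (by omega)
      have hidx : i * 2 ^ (ℓ + 1) = 2 * i * 2 ^ ℓ := by ring
      simp only [pvDescend]
      rw [hr2, hidx, pow_succ]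
      by_cases hc1 : 2 * i < (tree.getD ℓ []).length
      · by_cases hc2 : 2 * i + 1 < (tree.getD ℓ []).length
        · have e1 := ih hl (2 * i) hc1
          have e2 := ih hl (2 * i + 1) hc2
          rw [show 2 * i / 2 = i by omega] at e1
          rw [show (2 * i + 1) / 2 = i by omega] at e2
          rw [if_pos hc1, if_pos hc2, e1, e2,
              show (2 * i + 1) * 2 ^ ℓ = 2 * i * 2 ^ ℓ + 2 ^ ℓ by ring,
              show 2 ^ ℓ * 2 = 2 ^ ℓ + 2 ^ ℓ by ring, pvDropTakeSplit]
        · have e1 := ih hl (2 * i) hc1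
          rw [show 2 * i / 2 = i by omega] at e1
          rw [if_pos hc1, if_neg hc2, e1, List.append_nil]
          have hb : (pvR P tree 0).length ≤ 2 * i * 2 ^ ℓ + 2 ^ ℓ := by
            rw [hlen0]
            calc (tree.getD 0 []).length ≤ 2 ^ ℓ * (tree.getD ℓ []).length := hchain
              _ ≤ 2 ^ ℓ * (2 * i + 1) := Nat.mul_le_mul (Nat.le_refl _) (by omega)
              _ = 2 * i * 2 ^ ℓ + 2 ^ ℓ := by ring
          generalize hg : (2 : Nat) ^ ℓ = c at hb ⊢
          generalize hm : 2 * i * c = m at hb ⊢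
          rw [List.take_of_length_le (by rw [List.length_drop]; omega),
              List.take_of_length_le (by rw [List.length_drop]; omega)]
      · have hc2 : ¬ 2 * i + 1 < (tree.getD ℓ []).length := by omega
        rw [if_neg hc1, if_neg hc2, List.nil_append]
        have hb : (pvR P tree 0).length ≤ 2 * i * 2 ^ ℓ := by
          rw [hlen0]
          calc (tree.getD 0 []).length ≤ 2 ^ ℓ * (tree.getD ℓ []).length := hchain
            _ ≤ 2 ^ ℓ * (2 * i) := Nat.mul_le_mul (Nat.le_refl _) (by omega)
            _ = 2 * i * 2 ^ ℓ := by ring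
        rw [List.drop_eq_nil_of_le hb]
        simp

theorem pvChunks {α : Type} (xs : List α) (n c : Nat) :
    (List.range n).flatMap (fun j => (xs.drop (j * c)).take c) = xs.take (n * c) := by
  induction n with
  | zero => simp
  | succ n ih =>
      rw [List.range_succ, List.flatMap_append, ih, Nat.succ_mul, List.take_add]
      simp

-- A's port equals the foldr form pvR … 0
theorem pvA_eq (P : Int) (tree : List (List Int)) :
    remainder_tree P tree = pvR P tree 0 := by
  have hinner : ∀ (rems ns : List Int),
      (PySem.List.pyRange 0 (ns.length : Int) 1).foldl
        (fun newR i => newR ++ [PySem.Int.mod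
            (PySem.List.pyGetD rems (PySem.Int.floordiv i 2) 0)
            ((PySem.List.pyGetD ns i 0) ^ 2)]) []
      = pvStep ns rems := by
    intro rems ns
    rw [PySem.List.foldl_append_singleton_eq_map, List.nil_append,
        PySem.List.pyRange_zero_nat, List.map_map]
    unfold pvStep
    apply List.map_congr_left
    intro k _
    simp only [Function.comp]
    rw [show (2 : Int) = ((2 : Nat) : Int) by norm_num, PySem.Int.floordiv_natCast,
        PySem.List.pyGetD_natCast, PySem.List.pyGetD_natCast]
  have hfold : ∀ (init : List Int),
      (PySem.List.pyRange 0 (tree.length : Int) 1).foldr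
        (fun x y => pvStep (PySem.List.pyGetD tree x []) y) init
      = tree.foldr pvStep init := by
    intro init
    conv_rhs => rw [← PySem.List.map_pyGetD_pyRange_zero' tree ([] : List Int)]
    rw [List.foldr_map]
  simp only [remainder_tree]
  rw [PySem.List.pyRange_neg_one_eq_reverse, List.foldl_reverse,
      show (-1 : Int) + 1 = 0 by norm_num,
      show ((tree.length : Int) - 1) + 1 = (tree.length : Int) by ring]
  unfold pvR
  rw [List.drop_zero, ← hfold (List.replicate (PySem.List.pyGetD tree (-1) []).length P)]
  congr 1
  funext level rems
  exact hinner rems (PySem.List.pyGetD tree level [])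

-- B's port equals pvR … 0 under Pre_
theorem pvB_eq (P : Int) (tree : List (List Int)) (hne : tree ≠ [])
    (Hlen : ∀ ℓ < tree.length - 1, (tree.getD ℓ []).length ≤ 2 * (tree.getD (ℓ + 1) []).length) :
    remainder_tree_alt P tree = pvR P tree 0 := by
  have hL : 0 < tree.length := by
    cases tree with
    | nil => exact absurd rfl hne
    | cons a l => simp
  have htoplen : (PySem.List.pyGetD tree (-1) ([] : List Int)).length
      = (tree.getD (tree.length - 1) []).length := by
    rw [PySem.List.pyGetD_neg_one tree _ hne, List.getLast_eq_getElem,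
        List.getD_eq_getElem _ _ (by omega)]
  have hRL : pvR P tree tree.length
      = List.replicate (PySem.List.pyGetD tree (-1) ([] : List Int)).length P := by
    unfold pvR
    rw [List.drop_length]
    rfl
  have hstep : tree.length - 1 + 1 = tree.length := by omega
  simp only [remainder_tree_alt]
  rw [PySem.List.foldl_append_eq_flatMap, List.nil_append]
  have hflat : ∀ j ∈ List.range (PySem.List.pyGetD tree (-1) ([] : List Int)).length,
      pvDescend tree (tree.length - 1) j P
        = ((pvR P tree 0).drop (j * 2 ^ (tree.length - 1))).take (2 ^ (tree.length - 1)) := by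
    intro j hj
    rw [List.mem_range] at hj
    have hj' : j < (tree.getD (tree.length - 1) []).length := by rw [← htoplen]; exact hj
    have hP : (pvR P tree (tree.length - 1 + 1)).getD (j / 2) 0 = P := by
      rw [hstep, hRL, List.getD_eq_getElem?_getD, List.getElem?_replicate,
          if_pos (by omega : j / 2 < (PySem.List.pyGetD tree (-1) ([] : List Int)).length)]
      rfl
    conv_lhs => rw [← hP]
    exact pvDescend_eq P tree Hlen (tree.length - 1) (by omega) j hj'
  rw [List.flatMap_def, List.map_congr_left hflat, ← List.flatMap_def, pvChunks]
  apply List.take_of_length_le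
  rw [pvR_length P tree 0 hL]
  calc (tree.getD 0 []).length
      ≤ 2 ^ (tree.length - 1) * (tree.getD (tree.length - 1) []).length :=
        pvChain tree Hlen (tree.length - 1) (by omega)
    _ = (PySem.List.pyGetD tree (-1) ([] : List Int)).length * 2 ^ (tree.length - 1) := by
        rw [htoplen]; ring

-- ===== VERDICT (by name: the statement is the Claim_ definition above) =====
theorem remainder_tree_spec : Claim_equal_remainder_tree := by
  intro P tree _hdom hpre
  obtain ⟨hne, hlen, _⟩ := hpre
  unfold Spec_remainder_tree
  rw [pvA_eq, pvB_eq P tree hne hlen]
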